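-- pv_equiv track=rewrite | github.com/colorBeige/md2html | md2html.py | convert_paragraph
-- ===== SOURCE A (Python) =====
-- def convert_paragraph(text: str) -> str:
--     # 2. Paragraphs - blank line that separates text blocks
--     lines = text.split('\n')
--     result = []
--     current_paragraph = []
--
--     for line in lines:
--         stripped_line = line.strip()
--
--         # Ignore lines that are already HTML tags or empty lines
--         is_html_line = (
--             stripped_line.startswith('<h') and stripped_line.endswith('>') or
--             stripped_line.startswith('<ol>') or stripped_line.startswith('</ol>') or
--             stripped_line.startswith('<ul>') or stripped_line.startswith('</ul>') or
--             stripped_line.startswith('<li>') or stripped_line.startswith('</li>') or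
--             stripped_line == ''
--         )
--
--         if is_html_line:
--             # If we hit an HTML line, add line breaks for more than one line
--             # then wrap it in <p> tags and reset
--             if current_paragraph:
--                 paragraph_content = '<br>'.join(current_paragraph)
--                 result.append(f'<p>{paragraph_content}</p>')
--                 current_paragraph = []
--
--             # Remove unnecsessary empty lines and keep original lines
--             if stripped_line:
--                 result.append(line)
--         else:
--             # Text - may have multiple lines - add for future breaks
--             current_paragraph.append(stripped_line)
--
--     # Finish any remaining paragraph left in the end
--     if current_paragraph:
--         paragraph_content = '<br>'.join(current_paragraph)
--         result.append(f'<p>{paragraph_content}</p>')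
--
--     return '\n'.join(result)
-- ===== SOURCE B (Python) =====
-- def _is_html(line: str) -> bool:
--     s = line.strip()
--     return (
--         s.startswith('<h') and s.endswith('>') or
--         s.startswith('<ol>') or s.startswith('</ol>') or
--         s.startswith('<ul>') or s.startswith('</ul>') or
--         s.startswith('<li>') or s.startswith('</li>') or
--         s == ''
--     )
--
--
-- def convert_paragraph(text: str) -> str:
--     lines = text.split('\n')
--     out = []
--     i, n = 0, len(lines)
--     while i < n:
--         line = lines[i]
--         if _is_html(line):
--             if line.strip():
--                 out.append(line)
--             i += 1
--         else:
--             j = i + 1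
--             while j < n and not _is_html(lines[j]):
--                 j += 1
--             out.append('<p>' + '<br>'.join(l.strip() for l in lines[i:j]) + '</p>')
--             i = j
--     return '\n'.join(out)
-- ===== Notes on version B (the rewrite author's own statement) =====
-- stated objective: alternative
-- what changed: Replaces A's single accumulator loop (pending current_paragraph flushed at each HTML line) by a span-based scan that finds each maximal run of consecutive text lines and emits its paragraph in one step.
import Mathlib
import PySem

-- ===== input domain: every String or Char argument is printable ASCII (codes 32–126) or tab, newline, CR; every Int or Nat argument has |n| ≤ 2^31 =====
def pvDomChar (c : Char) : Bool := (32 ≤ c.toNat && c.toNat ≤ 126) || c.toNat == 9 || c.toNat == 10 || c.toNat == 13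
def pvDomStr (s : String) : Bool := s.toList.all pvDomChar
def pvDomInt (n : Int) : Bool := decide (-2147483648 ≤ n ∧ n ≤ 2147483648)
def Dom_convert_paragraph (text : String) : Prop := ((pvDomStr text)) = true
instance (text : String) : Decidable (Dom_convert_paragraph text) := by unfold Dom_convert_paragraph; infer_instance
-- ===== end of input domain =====

-- B replaces A's one-pass accumulator loop by a span-based scan over runs of
-- consecutive text lines (objective: alternative decomposition, same cost).

-- ===== PORT A =====
-- shared helpers: text.split('\n') and the is_html_line predicate (identical in Source A and Source B)
def pvSplitNl (text : String) : List String :=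
  (PySem.Chars.splitOn text.toList ['\n']).map String.ofList

def pvIsHtml (line : String) : Bool :=
  let s := PySem.Str.strip line
  (PySem.Str.startswith s "<h" && PySem.Str.endswith s ">") ||
    PySem.Str.startswith s "<ol>" || PySem.Str.startswith s "</ol>" ||
    PySem.Str.startswith s "<ul>" || PySem.Str.startswith s "</ul>" ||
    PySem.Str.startswith s "<li>" || PySem.Str.startswith s "</li>" || (s == "")

def pvPara (cur : List String) : String :=
  "<p>" ++ PySem.Str.join "<br>" cur ++ "</p>"

-- one iteration of A's for-loop; state = (result, current_paragraph)
def pvAStep (st : List String × List String) (line : String) : List String × List String :=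
  let s := PySem.Str.strip line
  if pvIsHtml line then
    let res := if st.2 ≠ [] then st.1 ++ [pvPara st.2] else st.1
    (if s ≠ "" then res ++ [line] else res, [])
  else (st.1, st.2 ++ [s])

def convert_paragraph (text : String) : String :=
  let st := (pvSplitNl text).foldl pvAStep ([], [])
  let res := if st.2 ≠ [] then st.1 ++ [pvPara st.2] else st.1
  PySem.Str.join "\n" res

-- ===== PORT B =====
-- Source B's outer while-loop: an html line is handled alone; a text line starts a
-- run lines[i:j] (the inner j-scan = takeWhile), emitted as one paragraph.
def pvBLoop : List String → List String
  | [] => []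
  | l :: ls =>
    if pvIsHtml l then
      (if PySem.Str.strip l ≠ "" then l :: pvBLoop ls else pvBLoop ls)
    else
      pvPara ((l :: ls.takeWhile (fun x => !pvIsHtml x)).map PySem.Str.strip) ::
        pvBLoop (ls.dropWhile (fun x => !pvIsHtml x))
termination_by ls => ls.length
decreasing_by
  · simp
  · simp
  · simpa using Nat.lt_succ_of_le (List.length_dropWhile_le _ _)

def convert_paragraph_alt (text : String) : String :=
  PySem.Str.join "\n" (pvBLoop (pvSplitNl text))

-- ===== PRECONDITION & SPEC =====
def Spec_convert_paragraph (text : String) (out : String) : Prop := out = convert_paragraph_alt text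
instance (text : String) (out : String) : Decidable (Spec_convert_paragraph text out) := by unfold Spec_convert_paragraph; infer_instance

-- ===== CLAIM (what is proved, stated in full; the proofs are below) =====
def Claim_equal_convert_paragraph : Prop := ∀ (text : String), Dom_convert_paragraph text → Spec_convert_paragraph text (convert_paragraph text)

-- ===== LEMMAS AND PROOFS =====

lemma pvBLoop_nil : pvBLoop [] = [] := by rw [pvBLoop.eq_def]

lemma pvBLoop_cons_html (l : String) (ls : List String) (h : pvIsHtml l = true) :
    pvBLoop (l :: ls) =
      (if PySem.Str.strip l ≠ "" then [l] else []) ++ pvBLoop ls := by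
  rw [pvBLoop.eq_def]
  by_cases hs : PySem.Str.strip l = "" <;> simp [h, hs]

lemma pvBLoop_cons_text (l : String) (ls : List String) (h : pvIsHtml l = false) :
    pvBLoop (l :: ls) =
      pvPara ((l :: ls.takeWhile (fun x => !pvIsHtml x)).map PySem.Str.strip) ::
        pvBLoop (ls.dropWhile (fun x => !pvIsHtml x)) := by
  rw [pvBLoop.eq_def]
  simp [h]

-- A's loop followed by the final flush, as a function of the pending paragraph
def pvOutA (cur ls : List String) : List String :=
  let st := ls.foldl pvAStep ([], cur)
  st.1 ++ (if st.2 ≠ [] then [pvPara st.2] else [])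

-- what B produces after the pending stripped lines `cur`, phrased via span
def pvOutB (cur ls : List String) : List String :=
  let p := cur ++ (ls.takeWhile (fun x => !pvIsHtml x)).map PySem.Str.strip
  (if p ≠ [] then [pvPara p] else []) ++ pvBLoop (ls.dropWhile (fun x => !pvIsHtml x))

lemma pvAStep_res (res cur : List String) (l : String) :
    pvAStep (res, cur) l =
      (res ++ (pvAStep ([], cur) l).1, (pvAStep ([], cur) l).2) := by
  by_cases h : pvIsHtml l = true <;>
    by_cases hc : cur = [] <;> by_cases hs : PySem.Str.strip l = "" <;>
      simp [pvAStep, h, hc, hs]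

lemma pvFoldl_res (ls : List String) : ∀ res cur,
    ls.foldl pvAStep (res, cur) =
      (res ++ (ls.foldl pvAStep ([], cur)).1, (ls.foldl pvAStep ([], cur)).2) := by
  induction ls with
  | nil => intro res cur; simp
  | cons l ls ih =>
    intro res cur
    simp only [List.foldl_cons, pvAStep_res res cur l]
    rw [ih (res ++ (pvAStep ([], cur) l).1) (pvAStep ([], cur) l).2,
        ih (pvAStep ([], cur) l).1 (pvAStep ([], cur) l).2]
    simp

lemma pvBLoop_eq_outB (ls : List String) : pvOutB [] ls = pvBLoop ls := by
  cases ls with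
  | nil => simp [pvOutB, pvBLoop_nil]
  | cons l ls =>
    by_cases h : pvIsHtml l = true
    · simp [pvOutB, h]
    · rw [pvBLoop_cons_text l ls (by simpa using h)]
      simp [pvOutB, h]

lemma pvOutA_eq_outB (ls : List String) : ∀ cur, pvOutA cur ls = pvOutB cur ls := by
  induction ls with
  | nil => intro cur; simp [pvOutA, pvOutB, pvBLoop_nil]
  | cons l ls ih =>
    intro cur
    by_cases h : pvIsHtml l = true
    · have step : pvAStep ([], cur) l =
          ((if cur ≠ [] then [pvPara cur] else []) ++
            (if PySem.Str.strip l ≠ "" then [l] else []), []) := by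
        by_cases hc : cur = [] <;> by_cases hs : PySem.Str.strip l = "" <;>
          simp [pvAStep, h, hc, hs]
      have hA : pvOutA cur (l :: ls) =
          ((if cur ≠ [] then [pvPara cur] else []) ++
            (if PySem.Str.strip l ≠ "" then [l] else [])) ++ pvOutA [] ls := by
        simp only [pvOutA, List.foldl_cons, step]
        rw [pvFoldl_res ls ((if cur ≠ [] then [pvPara cur] else []) ++
          (if PySem.Str.strip l ≠ "" then [l] else [])) []]
        simp
      rw [hA, ih [], pvBLoop_eq_outB ls]
      have hB : pvOutB cur (l :: ls) =
          (if cur ≠ [] then [pvPara cur] else []) ++ pvBLoop (l :: ls) := by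
        simp [pvOutB, h]
      rw [hB, pvBLoop_cons_html l ls h]
      by_cases hc : cur = [] <;> simp [hc]
    · have step : pvAStep ([], cur) l = ([], cur ++ [PySem.Str.strip l]) := by
        simp [pvAStep, h]
      have hA : pvOutA cur (l :: ls) = pvOutA (cur ++ [PySem.Str.strip l]) ls := by
        simp only [pvOutA, List.foldl_cons, step]
      rw [hA, ih]
      simp [pvOutB, h]

-- ===== VERDICT (by name: the statement is the Claim_ definition above) =====
theorem convert_paragraph_spec : Claim_equal_convert_paragraph := by
  intro text _
  show convert_paragraph text = convert_paragraph_alt text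
  unfold convert_paragraph convert_paragraph_alt
  rw [← pvBLoop_eq_outB, ← pvOutA_eq_outB]
  by_cases h2 : ((pvSplitNl text).foldl pvAStep ([], [])).2 = [] <;>
    simp [pvOutA, h2]
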